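-- pv_equiv track=rewrite | github.com/gaboza12/we-are-algorithm | 724thomas/Week1 DataStructure/2346.py | solution
-- ===== SOURCE A (Python) =====
-- from collections import deque
--
-- def solution(n, arr):
--     queue = deque()
--     for i in range(len(arr)):
--         queue.append((arr[i], i+1))
--     ans = []
--
--     while queue:
--         val, idx = queue.popleft()
--         ans.append(idx)
--         if not queue:
--             continue
--         if val > 0:
--             for i in range(val-1):
--                 queue.append(queue.popleft())
--         else:
--             for i in range(-val):
--                 queue.appendleft(queue.pop())
--     return ans
-- ===== SOURCE B (Python) =====
-- def solution(n, arr):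
--     # pointer arithmetic on a shrinking list: instead of rotating the deque
--     # element by element, jump the front pointer by (val-1) or val modulo the
--     # number of remaining elements.
--     rem = [(v, i + 1) for i, v in enumerate(arr)]
--     ans = []
--     p = 0
--     while rem:
--         val, idx = rem.pop(p)
--         ans.append(idx)
--         m = len(rem)
--         if m:
--             p = (p + (val - 1 if val > 0 else val)) % m
--     return ans
-- ===== Notes on version B (the rewrite author's own statement) =====
-- stated objective: faster
-- what changed: Replaces the deque simulation that rotates one element per step (up to |val| pops/appends per removal) with a shrinking list and a front pointer advanced by (val-1) or val modulo the remaining length, so each removal costs one list.pop plus O(1) arithmetic.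
import Mathlib
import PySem

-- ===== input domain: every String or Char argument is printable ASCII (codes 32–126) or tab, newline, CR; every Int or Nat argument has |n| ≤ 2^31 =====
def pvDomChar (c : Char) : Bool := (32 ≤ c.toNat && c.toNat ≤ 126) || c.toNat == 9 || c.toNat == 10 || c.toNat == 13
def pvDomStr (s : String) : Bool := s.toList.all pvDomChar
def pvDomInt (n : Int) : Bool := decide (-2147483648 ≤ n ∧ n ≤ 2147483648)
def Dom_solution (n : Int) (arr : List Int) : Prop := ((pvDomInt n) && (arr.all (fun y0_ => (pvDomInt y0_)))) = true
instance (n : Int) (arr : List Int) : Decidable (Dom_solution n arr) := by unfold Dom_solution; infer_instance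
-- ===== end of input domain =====

-- B replaces A's one-element-at-a-time deque rotations by a front pointer moved with
-- modular arithmetic over a shrinking list; equivalence of the RETURN value is proved.

-- ===== PORT A =====
-- queue.append(queue.popleft())  (queue never empty when executed)
def rotl1 (q : List (Int × Int)) : List (Int × Int) :=
  match q with
  | [] => []
  | x :: t => t ++ [x]

-- queue.appendleft(queue.pop())  (queue never empty when executed)
def rotr1 (q : List (Int × Int)) : List (Int × Int) :=
  match q.getLast? with
  | none => []
  | some x => x :: q.dropLast

-- for i in range(k): queue.append(queue.popleft())
def rotln : Nat → List (Int × Int) → List (Int × Int)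
  | 0, q => q
  | k + 1, q => rotln k (rotl1 q)

-- for i in range(k): queue.appendleft(queue.pop())
def rotrn : Nat → List (Int × Int) → List (Int × Int)
  | 0, q => q
  | k + 1, q => rotrn k (rotr1 q)

-- the while loop; fuel = initial queue length (one element is removed per iteration)
def loopA : Nat → List (Int × Int) → List Int
  | 0, _ => []
  | _ + 1, [] => []
  | fuel + 1, (val, idx) :: rest =>
    idx ::
      (if rest.isEmpty then loopA fuel rest
       else if val > 0 then loopA fuel (rotln (val - 1).toNat rest)
       else loopA fuel (rotrn (-val).toNat rest))

def solution (n : Int) (arr : List Int) : List Int :=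
  let queue := (PySem.List.pyRange 0 arr.length 1).map
    (fun i => (PySem.List.pyGetD arr i 0, i + 1))
  loopA queue.length queue

-- ===== PORT B =====
-- the while loop of Source B; fuel = initial list length
def loopB : Nat → Int → List (Int × Int) → List Int
  | 0, _, _ => []
  | fuel + 1, p, rem =>
    match PySem.List.pop? rem p with
    | none => []  -- rem = []: while-loop exit (pop always succeeds, 0 ≤ p < len rem)
    | some ((val, idx), rem') =>
      idx ::
        (if (rem'.length : Int) ≠ 0 then
          loopB fuel (PySem.Int.mod (p + (if val > 0 then val - 1 else val)) rem'.length) rem'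
        else loopB fuel p rem')

def solution_alt (n : Int) (arr : List Int) : List Int :=
  let rem := (PySem.List.enumerate arr).map (fun p => (p.2, p.1 + 1))
  loopB rem.length 0 rem

-- ===== PRECONDITION & SPEC =====
def Spec_solution (n : Int) (arr : List Int) (out : List Int) : Prop := out = solution_alt n arr
instance (n : Int) (arr : List Int) (out : List Int) : Decidable (Spec_solution n arr out) := by unfold Spec_solution; infer_instance

-- ===== CLAIM (what is proved, stated in full; the proofs are below) =====
def Claim_equal_solution : Prop := ∀ (n : Int) (arr : List Int), Dom_solution n arr → Spec_solution n arr (solution n arr)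

-- ===== LEMMAS AND PROOFS =====

-- "the list l rotated left by p": the canonical form both loops are related through
def rotIdx (p : Nat) (l : List (Int × Int)) : List (Int × Int) :=
  l.drop (p % l.length) ++ l.take (p % l.length)

lemma rotIdx_mod (p : Nat) (l : List (Int × Int)) : rotIdx (p % l.length) l = rotIdx p l := by
  simp [rotIdx, Nat.mod_mod_of_dvd _ (dvd_refl l.length)]

lemma rotIdx_zero (l : List (Int × Int)) : rotIdx 0 l = l := by
  cases l <;> simp [rotIdx]

lemma rotIdx_cons (p : Nat) (l : List (Int × Int)) (h : p < l.length) :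
    rotIdx p l = l[p] :: (l.drop (p + 1) ++ l.take p) := by
  unfold rotIdx
  rw [Nat.mod_eq_of_lt h, List.drop_eq_getElem_cons h]
  rfl

lemma rotl1_rotIdx (p : Nat) (l : List (Int × Int)) (h : l ≠ []) :
    rotl1 (rotIdx p l) = rotIdx (p + 1) l := by
  have hm : 0 < l.length := List.length_pos_of_ne_nil h
  have hq : p % l.length < l.length := Nat.mod_lt _ hm
  rw [← rotIdx_mod p l, rotIdx_cons _ _ hq]
  have hmod : (p + 1) % l.length = (p % l.length + 1) % l.length := by
    conv_lhs => rw [← Nat.mod_add_mod]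
  by_cases h1 : p % l.length + 1 < l.length
  · have : (p + 1) % l.length = p % l.length + 1 := by
      rw [hmod]; exact Nat.mod_eq_of_lt h1
    simp only [rotl1, rotIdx, this, List.append_assoc, List.take_append_getElem hq]
  · have hEq : p % l.length + 1 = l.length := by omega
    have : (p + 1) % l.length = 0 := by rw [hmod, hEq, Nat.mod_self]
    simp only [rotl1, rotIdx, this, List.drop_zero, List.take_zero,
      List.append_nil, List.take_append_getElem hq, hEq,
      List.drop_length, List.take_length, List.nil_append]

lemma rotln_rotIdx (k p : Nat) (l : List (Int × Int)) (h : l ≠ []) :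
    rotln k (rotIdx p l) = rotIdx (p + k) l := by
  induction k generalizing p with
  | zero => simp [rotln]
  | succ k ih =>
      rw [rotln, rotl1_rotIdx p l h, ih (p + 1)]
      ring_nf

lemma rotIdx_ne_nil (p : Nat) (l : List (Int × Int)) (h : l ≠ []) : rotIdx p l ≠ [] := by
  have : (rotIdx p l).length = l.length := by
    simp [rotIdx]; omega
  intro hc
  rw [hc] at this
  simp at this
  exact h (List.eq_nil_of_length_eq_zero this.symm)

lemma rotr1_rotl1 (q : List (Int × Int)) (h : q ≠ []) : rotr1 (rotl1 q) = q := by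
  cases q with
  | nil => exact absurd rfl h
  | cons x t => simp [rotl1, rotr1]

lemma rotr1_rotIdx (p : Nat) (l : List (Int × Int)) (h : l ≠ []) :
    rotr1 (rotIdx p l) = rotIdx (p + (l.length - 1)) l := by
  have hm : 0 < l.length := List.length_pos_of_ne_nil h
  have key : rotl1 (rotIdx (p + (l.length - 1)) l) = rotIdx p l := by
    rw [rotl1_rotIdx _ _ h]
    have h1 : p + (l.length - 1) + 1 = p + l.length := by omega
    rw [h1, ← rotIdx_mod (p + l.length) l, Nat.add_mod_right, rotIdx_mod]
  rw [← key, rotr1_rotl1 _ (rotIdx_ne_nil _ _ h)]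

lemma rotrn_rotIdx (k p : Nat) (l : List (Int × Int)) (h : l ≠ []) :
    rotrn k (rotIdx p l) = rotIdx (p + k * (l.length - 1)) l := by
  induction k generalizing p with
  | zero => simp [rotrn]
  | succ k ih =>
      rw [rotrn, rotr1_rotIdx p l h, ih]
      ring_nf

lemma erase_rotIdx (p : Nat) (l : List (Int × Int)) (h : p < l.length) :
    l.drop (p + 1) ++ l.take p = rotIdx p (l.eraseIdx p) := by
  have hlen : (l.eraseIdx p).length = l.length - 1 := List.length_eraseIdx_of_lt h
  have htk : (l.take p).length = p := by simp; omega
  rw [List.eraseIdx_eq_take_drop_succ]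
  by_cases hp : p < l.length - 1
  · have hmod : p % (l.take p ++ l.drop (p + 1)).length = p := by
      rw [← List.eraseIdx_eq_take_drop_succ, hlen]; exact Nat.mod_eq_of_lt hp
    unfold rotIdx
    rw [hmod, List.drop_append_of_le_length (by omega), List.take_append_of_le_length (by omega)]
    simp [htk]
  · have hpe : p = l.length - 1 := by omega
    have hdrop : l.drop (p + 1) = [] := by
      apply List.drop_eq_nil_of_le; omega
    have htake : (l.take p).drop p = [] := by
      apply List.drop_eq_nil_of_le; omega
    have hmod : p % (l.take p ++ l.drop (p + 1)).length = 0 := by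
      rw [hdrop]; simp [htk]
    unfold rotIdx
    rw [hmod]
    simp [hdrop]

lemma loopB_nil (fuel : Nat) (p : Int) : loopB fuel p [] = [] := by
  cases fuel <;> simp [loopB, PySem.List.pop?]

lemma loopA_nil (fuel : Nat) : loopA fuel [] = [] := by
  cases fuel <;> rfl

lemma loop_eq (fuel : Nat) : ∀ (l : List (Int × Int)) (p : Nat), p < l.length →
    loopA fuel (rotIdx p l) = loopB fuel (p : Int) l := by
  induction fuel with
  | zero => intro l p _; rfl
  | succ fuel ih =>
    intro l p hp
    have hne : l ≠ [] := List.ne_nil_of_length_pos (by omega)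
    have hpop := PySem.List.pop?_natCast l p hp
    rcases hv : l[p] with ⟨val, idx⟩
    rw [hv] at hpop
    have hm' : (l.eraseIdx p).length = l.length - 1 := List.length_eraseIdx_of_lt hp
    have hrr : l.drop (p + 1) ++ l.take p = rotIdx p (l.eraseIdx p) := erase_rotIdx p l hp
    rw [rotIdx_cons p l hp, hv]
    by_cases h0 : l.length - 1 = 0
    · have hre : l.drop (p + 1) ++ l.take p = ([] : List (Int × Int)) := by
        apply List.eq_nil_of_length_eq_zero; simp; omega
      have hee : l.eraseIdx p = [] := List.eq_nil_of_length_eq_zero (by omega)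
      rw [hre]
      simp only [loopA, List.isEmpty_nil, if_true, loopA_nil]
      rw [loopB, hpop, hee]
      simp [loopB_nil]
    · have hene : l.eraseIdx p ≠ [] := List.ne_nil_of_length_pos (by omega)
      have hrne : (l.drop (p + 1) ++ l.take p).isEmpty = false := by
        rw [hrr]
        simp only [List.isEmpty_eq_false_iff]
        exact rotIdx_ne_nil _ _ hene
      have hmpos : (0 : Int) < ((l.eraseIdx p).length : Int) := by exact_mod_cast Nat.pos_of_ne_zero (by omega)
      simp only [loopA, hrne, Bool.false_eq_true, if_false]
      rw [loopB, hpop]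
      dsimp only
      rw [if_pos (show ((l.eraseIdx p).length : Int) ≠ 0 by omega)]
      congr 1
      by_cases hval : val > 0
      · rw [if_pos hval, if_pos hval, hrr, rotln_rotIdx _ _ _ hene,
          ← rotIdx_mod (p + (val - 1).toNat) (l.eraseIdx p)]
        rw [ih _ _ (Nat.mod_lt _ (by omega))]
        congr 1
        rw [PySem.Int.mod_eq_emod_of_pos hmpos]
        have hk : ((val - 1).toNat : Int) = val - 1 := Int.toNat_of_nonneg (by omega)
        push_cast [hk]
        ring_nf
      · rw [if_neg hval, if_neg hval, hrr, rotrn_rotIdx _ _ _ hene,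
          ← rotIdx_mod (p + (-val).toNat * ((l.eraseIdx p).length - 1)) (l.eraseIdx p)]
        rw [ih _ _ (Nat.mod_lt _ (by omega))]
        congr 1
        rw [PySem.Int.mod_eq_emod_of_pos hmpos]
        have hk : ((-val).toNat : Int) = -val := Int.toNat_of_nonneg (by omega)
        have hcast : ((((l.eraseIdx p).length - 1 : Nat)) : Int) = ((l.eraseIdx p).length : Int) - 1 := by
          omega
        push_cast [hk, hcast]
        have : (p : Int) + -val * (((l.eraseIdx p).length : Int) - 1)
             = ((p : Int) + val) + (-val) * ((l.eraseIdx p).length : Int) := by ring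
        rw [this, Int.add_mul_emod_self_right]

-- ===== VERDICT (by name: the statement is the Claim_ definition above) =====
theorem solution_spec : Claim_equal_solution := by
  intro n arr _
  unfold Spec_solution solution solution_alt
  have hq : (PySem.List.pyRange 0 arr.length 1).map
      (fun i => (PySem.List.pyGetD arr i 0, i + 1))
      = (PySem.List.enumerate arr).map (fun p => (p.2, p.1 + 1)) := by
    rw [PySem.List.enumerate_eq_map_pyRange (d := 0), List.map_map]
    rfl
  rw [hq]
  cases hQ : (PySem.List.enumerate arr).map (fun p => (p.2, p.1 + 1)) with
  | nil => rfl
  | cons x t =>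
      rw [← hQ]
      have hlen : 0 < ((PySem.List.enumerate arr).map (fun p => (p.2, p.1 + 1))).length := by
        rw [hQ]; simp
      have := loop_eq ((PySem.List.enumerate arr).map (fun p => (p.2, p.1 + 1))).length
        ((PySem.List.enumerate arr).map (fun p => (p.2, p.1 + 1))) 0 hlen
      rw [rotIdx_zero] at this
      exact_mod_cast this
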